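-- pv_equiv track=rewrite | github.com/DarkAlexWang/leetcode | Amazon/OnlineAssessment/periods_of_decrease_rating.py | periodsOfDecreaseRating2
-- ===== SOURCE A (Python) =====
-- def periodsOfDecreaseRating2(ratings):
--     """
--     two pointer O(n) approach
--     """
--     res = 0
--     i = 0
--     m = len(ratings)
--
--     for j in range(m):
--         if j > 0 and ratings[j] < ratings[j - 1]:
--             res += j - i + 1
--         else:
--             res += 1
--             i = j
--     return res
-- ===== SOURCE B (Python) =====
-- def periodsOfDecreaseRating2(ratings):
--     """
--     One pass tracking the length L of the current strictly-decreasing run;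
--     each maximal run of length L contributes L*(L+1)//2 subarrays (simpler,
--     per-run closed form instead of incremental j-i+1 accumulation).
--     """
--     res = 0
--     L = 1
--     for prev, cur in zip(ratings, ratings[1:]):
--         if cur < prev:
--             L += 1
--         else:
--             res += L * (L + 1) // 2
--             L = 1
--     if ratings:
--         res += L * (L + 1) // 2
--     return res
-- ===== Notes on version B (the rewrite author's own statement) =====
-- stated objective: simpler
-- what changed: Replaces A's index-based two-pointer loop with incremental j-i+1 accumulation by a single structural pass over adjacent pairs that tracks only the current run length and adds each maximal decreasing run's triangular number L*(L+1)//2 in closed form.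
import Mathlib
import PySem

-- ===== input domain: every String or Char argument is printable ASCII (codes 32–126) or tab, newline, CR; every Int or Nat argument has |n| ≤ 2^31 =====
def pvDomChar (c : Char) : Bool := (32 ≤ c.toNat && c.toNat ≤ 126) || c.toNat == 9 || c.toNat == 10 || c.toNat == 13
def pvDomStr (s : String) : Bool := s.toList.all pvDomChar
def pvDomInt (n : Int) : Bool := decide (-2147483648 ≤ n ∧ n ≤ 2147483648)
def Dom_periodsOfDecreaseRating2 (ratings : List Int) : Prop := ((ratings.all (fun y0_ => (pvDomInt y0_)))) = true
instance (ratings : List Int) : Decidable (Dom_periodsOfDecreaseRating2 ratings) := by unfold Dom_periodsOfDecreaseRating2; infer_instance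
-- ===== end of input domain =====

-- B replaces A's index/two-pointer accumulation by one structural pass over adjacent
-- pairs adding each maximal decreasing run's triangular number in closed form (simpler).

-- ===== PORT A =====
-- the body of A's for-loop (state = (res, i), loop variable j)
def pdrStep (ratings : List Int) (st : Int × Int) (j : Int) : Int × Int :=
  if j > 0 ∧ PySem.List.pyGetD ratings j 0 < PySem.List.pyGetD ratings (j - 1) 0 then
    (st.1 + j - st.2 + 1, st.2)   -- res += j - i + 1
  else
    (st.1 + 1, j)                 -- res += 1; i = j

def periodsOfDecreaseRating2 (ratings : List Int) : Int :=
  let res : Int := 0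
  let i : Int := 0
  let m : Int := ratings.length
  let st := (PySem.List.pyRange 0 m 1).foldl (pdrStep ratings) (res, i)
  st.1

-- ===== PORT B =====
-- the loop of Source B: prev = previous element, L = current run length, res = closed runs
def pdrGo (prev L res : Int) : List Int → Int
  | [] => res + PySem.Int.floordiv (L * (L + 1)) 2
  | c :: t =>
    if c < prev then pdrGo c (L + 1) res t
    else pdrGo c 1 (res + PySem.Int.floordiv (L * (L + 1)) 2) t

def periodsOfDecreaseRating2_alt (ratings : List Int) : Int :=
  match ratings with
  | [] => 0
  | h :: t => pdrGo h 1 0 t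

-- ===== PRECONDITION & SPEC =====
def Spec_periodsOfDecreaseRating2 (ratings : List Int) (out : Int) : Prop := out = periodsOfDecreaseRating2_alt ratings
instance (ratings : List Int) (out : Int) : Decidable (Spec_periodsOfDecreaseRating2 ratings out) := by unfold Spec_periodsOfDecreaseRating2; infer_instance

-- ===== CLAIM (what is proved, stated in full; the proofs are below) =====
def Claim_equal_periodsOfDecreaseRating2 : Prop := ∀ (ratings : List Int), Dom_periodsOfDecreaseRating2 ratings → Spec_periodsOfDecreaseRating2 ratings (periodsOfDecreaseRating2 ratings)

-- ===== LEMMAS AND PROOFS =====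

-- triangular-number step: tri L + (L+1) = tri (L+1)
theorem pdr_tri_succ (L : Int) (_hL : 0 ≤ L) :
    PySem.Int.floordiv (L * (L + 1)) 2 + (L + 1) =
      PySem.Int.floordiv ((L + 1) * (L + 1 + 1)) 2 := by
  rw [PySem.Int.floordiv_eq_ediv_of_pos (by omega),
      PySem.Int.floordiv_eq_ediv_of_pos (by omega)]
  obtain ⟨t, ht⟩ := Int.even_mul_succ_self L
  have h2 : (L + 1) * (L + 1 + 1) = (t + L + 1) + (t + L + 1) := by nlinarith [ht]
  omega

theorem pdr_tri_one : PySem.Int.floordiv (1 * (1 + 1)) 2 = 1 := by decide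

-- lookup of the just-appended boundary pair
theorem pdr_getD_append_length (pre : List Int) (y : Int) (ys : List Int) :
    PySem.List.pyGetD (pre ++ y :: ys) (pre.length : Int) 0 = y := by
  simp [PySem.List.pyGetD]

-- main loop invariant: after processing the prefix `pre` (nonempty, last element
-- `prev`, current decreasing run of length L, closed-runs total `res`), A's
-- remaining fold over the indices of `rest` equals B's structural pass over `rest`.
theorem pdr_main (rest : List Int) : ∀ (pre : List Int) (prev res : Int) (L : Nat),
    1 ≤ L → L ≤ pre.length → pre.getLast? = some prev →
    ((PySem.List.pyRange (pre.length : Int) (((pre ++ rest).length : Nat) : Int) 1).foldl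
        (pdrStep (pre ++ rest))
        (res + PySem.Int.floordiv ((L : Int) * ((L : Int) + 1)) 2,
         (pre.length : Int) - (L : Int))).1
      = pdrGo prev (L : Int) res rest := by
  induction rest with
  | nil =>
    intro pre prev res L hL hLk hlast
    rw [PySem.List.pyRange_one_eq_nil (by simp)]
    simp [pdrGo]
  | cons c t ih =>
    intro pre prev res L hL hLk hlast
    have hpre : pre = pre.dropLast ++ [prev] := by
      have := List.dropLast_append_getLast? prev hlast
      simpa using this.symm
    have hlen : ((pre.length : Int)) < (((pre ++ c :: t).length : Nat) : Int) := by
      have : pre.length < (pre ++ c :: t).length := by simp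
      exact_mod_cast this
    rw [PySem.List.pyRange_one_cons hlen, List.foldl_cons]
    have hget_j : PySem.List.pyGetD (pre ++ c :: t) (pre.length : Int) 0 = c :=
      pdr_getD_append_length pre c t
    have hget_j1 : PySem.List.pyGetD (pre ++ c :: t) ((pre.length : Int) - 1) 0 = prev := by
      have hpl : (pre.length : Int) - 1 = ((pre.dropLast.length : Nat) : Int) := by
        have h1 : 1 ≤ pre.length := le_trans hL hLk
        simp [List.length_dropLast]
        omega
      have heq : pre ++ c :: t = pre.dropLast ++ prev :: c :: t := by
        conv_lhs => rw [hpre]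
        simp
      rw [heq, hpl]
      exact pdr_getD_append_length _ prev _
    have h2 : pre ++ c :: t = pre ++ [c] ++ t := by simp
    by_cases hc : c < prev
    · have hstep : pdrStep (pre ++ c :: t)
          (res + PySem.Int.floordiv ((L : Int) * ((L : Int) + 1)) 2,
           (pre.length : Int) - (L : Int)) (pre.length : Int)
          = (res + PySem.Int.floordiv (((L : Int) + 1) * (((L : Int) + 1) + 1)) 2,
             (pre.length : Int) - (L : Int)) := by
        have hj : ((pre.length : Int)) > 0 := by
          have : 0 < pre.length := by omega
          exact_mod_cast this
        rw [pdrStep, if_pos ⟨hj, by rw [hget_j, hget_j1]; exact hc⟩]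
        have htri := pdr_tri_succ (L : Int) (by positivity)
        simp only [Prod.mk.injEq]
        constructor
        · linarith
        · trivial
      rw [hstep]
      have hih := ih (pre ++ [c]) c res (L + 1) (by omega) (by simp; omega) (by simp)
      push_cast at hih
      rw [h2]
      have hrhs : pdrGo prev (L : Int) res (c :: t) = pdrGo c ((L : Int) + 1) res t := by
        simp [pdrGo, hc]
      rw [hrhs]
      simp only [List.length_append, List.length_cons, List.length_nil] at hih ⊢
      push_cast at hih ⊢
      ring_nf at hih ⊢
      exact hih
    · have hstep : pdrStep (pre ++ c :: t)
          (res + PySem.Int.floordiv ((L : Int) * ((L : Int) + 1)) 2,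
           (pre.length : Int) - (L : Int)) (pre.length : Int)
          = (res + PySem.Int.floordiv ((L : Int) * ((L : Int) + 1)) 2 + 1,
             (pre.length : Int)) := by
        rw [pdrStep, if_neg]
        intro ⟨_, hlt⟩
        rw [hget_j, hget_j1] at hlt
        exact hc hlt
      rw [hstep]
      have hih := ih (pre ++ [c]) c
        (res + PySem.Int.floordiv ((L : Int) * ((L : Int) + 1)) 2) 1
        (le_refl 1) (by simp) (by simp)
      push_cast at hih
      rw [show PySem.Int.floordiv (2 : Int) 2 = 1 from by decide] at hih
      rw [h2]
      have hrhs : pdrGo prev (L : Int) res (c :: t)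
          = pdrGo c 1 (res + PySem.Int.floordiv ((L : Int) * ((L : Int) + 1)) 2) t := by
        simp [pdrGo, hc]
      rw [hrhs]
      simp only [List.length_append, List.length_cons, List.length_nil] at hih ⊢
      push_cast at hih ⊢
      ring_nf at hih ⊢
      exact hih

-- ===== VERDICT (by name: the statement is the Claim_ definition above) =====
theorem periodsOfDecreaseRating2_spec : Claim_equal_periodsOfDecreaseRating2 := by
  intro ratings _
  unfold Spec_periodsOfDecreaseRating2
  cases ratings with
  | nil => rfl
  | cons h t =>
    show (((PySem.List.pyRange 0 (((h :: t).length : Nat) : Int) 1).foldl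
        (pdrStep (h :: t)) (0, 0)).1) = periodsOfDecreaseRating2_alt (h :: t)
    have h0 : (0 : Int) < (((h :: t).length : Nat) : Int) := by simp
    rw [PySem.List.pyRange_one_cons h0, List.foldl_cons]
    have hstep : pdrStep (h :: t) (0, 0) 0 = (1, 0) := by
      rw [pdrStep, if_neg]; · rfl
      · intro ⟨hj, _⟩; omega
    rw [hstep]
    have := pdr_main t [h] h 0 1 (by omega) (by simp) (by simp)
    simp only [List.singleton_append] at this
    have h1 : (([h] : List Int).length : Int) = 1 := by simp
    calc ((PySem.List.pyRange (0+1) (((h :: t).length : Nat) : Int) 1).foldl (pdrStep (h :: t)) (1, 0)).1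
        = pdrGo h ((1 : Nat) : Int) 0 t := by
          rw [← this]
          norm_num [pdr_tri_one]
      _ = periodsOfDecreaseRating2_alt (h :: t) := by
          rfl
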